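-- pv_equiv track=rewrite | github.com/KirolosAyman/Dynamic-Programming-Challenges | gridTraveler memoization/gridTravelermemoization.py | gridTraveler_memoization
-- ===== SOURCE A (Python) =====
-- def gridTraveler_memoization(m,n,memo={}):
--     key = f"{m},{n}"
--     if key in memo :
--         return memo[key]
--     if m==1 and n==1:
--         return 1
--     if m == 0 or n == 0 :
--         return 0
--     memo[key]  = gridTraveler_memoization(m-1 , n ,memo) + gridTraveler_memoization(m , n-1,memo)
--     return memo[key]
-- ===== SOURCE B (Python) =====
-- def gridTraveler_memoization(m, n, memo={}):
--     if m <= 0 or n <= 0: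
--         return 0
--     k = min(m, n) - 1
--     r = 1
--     for i in range(1, k + 1):
--         r = r * (m + n - 2 - k + i) // i
--     return r
-- ===== Notes on version B (the rewrite author's own statement) =====
-- stated objective: faster
-- what changed: Replaces the O(m*n) memoized recursion with the closed-form binomial coefficient C(m+n-2, m-1), computed exactly by a multiplicative loop of length min(m,n)-1, ignoring the cache parameter.
-- outside the precondition, e.g. on gridTraveler_memoization(2, 2, {'1,2': 5}): A returns 6, B returns 2; on gridTraveler_memoization(2, 2, {'2,2': 99}): A returns 99, B returns 2
import Mathlib
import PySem

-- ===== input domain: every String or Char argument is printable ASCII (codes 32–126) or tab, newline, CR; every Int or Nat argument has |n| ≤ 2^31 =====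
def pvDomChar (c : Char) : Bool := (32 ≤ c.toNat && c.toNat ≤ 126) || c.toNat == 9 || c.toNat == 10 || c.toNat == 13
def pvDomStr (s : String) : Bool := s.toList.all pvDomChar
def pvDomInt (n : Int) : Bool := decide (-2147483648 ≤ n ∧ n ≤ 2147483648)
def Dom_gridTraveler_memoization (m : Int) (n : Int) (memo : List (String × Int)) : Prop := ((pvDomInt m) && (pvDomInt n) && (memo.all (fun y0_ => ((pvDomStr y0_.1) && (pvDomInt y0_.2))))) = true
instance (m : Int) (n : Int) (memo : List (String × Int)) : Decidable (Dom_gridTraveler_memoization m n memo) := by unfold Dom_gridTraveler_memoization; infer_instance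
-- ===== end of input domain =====

-- B replaces A's memoized recursion by the closed-form binomial C(m+n-2, m-1) (objective: faster);
-- A mutates its memo argument in place, B does not — the equivalence proved here is about the RETURN value only.

-- ===== PORT A =====
def pvKey (m n : Int) : String := PySem.Int.toStr m ++ "," ++ PySem.Int.toStr n

def pvGoA : Nat → Int → Int → PySem.Dict String Int → Int × PySem.Dict String Int
  | 0, _, _, memo => (0, memo)      -- fuel exhaustion: unreachable inside Pre_ (Python diverges outside)
  | Nat.succ fuel, m, n, memo =>
    match memo.get? (pvKey m n) with
    | some v => (v, memo)
    | none =>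
      if m = 1 ∧ n = 1 then (1, memo)
      else if m = 0 ∨ n = 0 then (0, memo)
      else
        let r1 := pvGoA fuel (m - 1) n memo
        let r2 := pvGoA fuel m (n - 1) r1.2
        let memo2 := r2.2.insert (pvKey m n) (r1.1 + r2.1)
        (memo2.getD (pvKey m n) 0, memo2)

def gridTraveler_memoization (m : Int) (n : Int) (memo : List (String × Int)) : Int :=
  (pvGoA ((m + n).toNat + 1) m n (PySem.Dict.mk memo)).1

-- ===== PORT B =====
def gridTraveler_memoization_alt (m : Int) (n : Int) (memo : List (String × Int)) : Int :=
  if m ≤ 0 ∨ n ≤ 0 then 0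
  else
    let k := min m n - 1
    (PySem.List.pyRange 1 (k + 1) 1).foldl (fun r i => PySem.Int.floordiv (r * (m + n - 2 - k + i)) i) 1

-- ===== PRECONDITION & SPEC =====
-- helpers for Pre_: is a memo key exactly "i,j" (canonical decimal ints) for a cell A's traversal reads?
-- (a degenerate or 1×1 start reads only its own key; "0,0", "0,1", "1,0" are never read otherwise)
def pvDecode (cs : List Char) : Nat := cs.foldl (fun a c => 10 * a + (c.toNat - 48)) 0
def pvDecInt (cs : List Char) : Int :=
  if cs.take 1 = ['-'] then -(pvDecode (cs.drop 1) : Int) else (pvDecode cs : Int)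
def pvParse? (cs : List Char) : Option (Int × Int) :=
  match cs.dropWhile (fun c => c ≠ ',') with
  | ',' :: bs =>
      let as := cs.takeWhile (fun c => c ≠ ',')
      if as = PySem.Int.toChars (pvDecInt as) ∧ bs = PySem.Int.toChars (pvDecInt bs)
      then some (pvDecInt as, pvDecInt bs) else none
  | _ => none
def pvRelevant (m n : Int) (cs : List Char) : Bool :=
  match pvParse? cs with
  | some (i, j) =>
      if m = 0 ∨ n = 0 ∨ (m = 1 ∧ n = 1) then i == m && j == n
      else decide (0 ≤ i) && decide (i ≤ m) && decide (0 ≤ j) && decide (j ≤ n) &&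
        !((i == 0 && decide (j ≤ 1)) || (i == 1 && j == 0))
  | none => false

-- Pre_ excludes (a) grids with a negative side (unless the other side is 0, A recurses forever —
-- Python RecursionError), and (b) memos that already hold the key "i,j" of a cell A's traversal reads,
-- where A returns whatever the cache claims instead of the path count (a pre-seeded cache's
-- correctness is the caller's unstated promise).
def Pre_gridTraveler_memoization (m : Int) (n : Int) (memo : List (String × Int)) : Prop :=
  (m = 0 ∨ n = 0 ∨ (0 ≤ m ∧ 0 ≤ n)) ∧ ∀ p ∈ memo, pvRelevant m n p.1.toList = false
instance (m : Int) (n : Int) (memo : List (String × Int)) : Decidable (Pre_gridTraveler_memoization m n memo) := by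
  unfold Pre_gridTraveler_memoization; infer_instance

def pvWitness_gridTraveler_memoization : Int × Int × (List (String × Int)) := (2, 3, [("x", 5)])

def Spec_gridTraveler_memoization (m : Int) (n : Int) (memo : List (String × Int)) (out : Int) : Prop := out = gridTraveler_memoization_alt m n memo
instance (m : Int) (n : Int) (memo : List (String × Int)) (out : Int) : Decidable (Spec_gridTraveler_memoization m n memo out) := by unfold Spec_gridTraveler_memoization; infer_instance

-- ===== CLAIM (what is proved, stated in full; the proofs are below) =====
def Claim_equal_gridTraveler_memoization : Prop := ∀ (m : Int) (n : Int) (memo : List (String × Int)), Dom_gridTraveler_memoization m n memo → Pre_gridTraveler_memoization m n memo → Spec_gridTraveler_memoization m n memo (gridTraveler_memoization m n memo)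

-- ===== LEMMAS AND PROOFS =====

-- the common mathematical value: lattice-path count, 0 on a degenerate grid
def pvG (m n : Int) : Int := (((m - 1).toNat + (n - 1).toNat).choose (m - 1).toNat : Nat)

-- ---- decimal strings: digits only, decode roundtrip, injectivity of the key ----
lemma pvCore_acc (f : Nat) : ∀ (x : Nat) (acc : List Char),
    Nat.toDigitsCore 10 f x acc = Nat.toDigitsCore 10 f x [] ++ acc := by
  induction f with
  | zero => intro x acc; simp [Nat.toDigitsCore]
  | succ f ih =>
    intro x acc
    simp only [Nat.toDigitsCore]
    by_cases h : x / 10 = 0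
    · simp [h]
    · simp only [h]
      rw [ih (x/10) (_ :: acc), ih (x/10) [_]]
      simp

lemma pvCore_digits (f : Nat) : ∀ (x : Nat) (c : Char),
    c ∈ Nat.toDigitsCore 10 f x [] → ('0' ≤ c ∧ c ≤ '9') := by
  induction f with
  | zero => intro x c h; simp [Nat.toDigitsCore] at h
  | succ f ih =>
    intro x c h
    simp only [Nat.toDigitsCore] at h
    have hd : ('0' ≤ (x % 10).digitChar ∧ (x % 10).digitChar ≤ '9') := by
      have : x % 10 < 10 := Nat.mod_lt _ (by norm_num)
      interval_cases h : x % 10 <;> decide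
    by_cases h0 : x / 10 = 0
    · simp [h0] at h; subst h; exact hd
    · simp only [h0] at h
      rw [pvCore_acc] at h
      rcases List.mem_append.1 h with h | h
      · exact ih _ _ h
      · simp at h; subst h; exact hd

lemma pvCore_decode (f : Nat) : ∀ (x a : Nat), x < f →
    (Nat.toDigitsCore 10 f x []).foldl (fun a c => 10 * a + (c.toNat - 48)) a
      = a * 10 ^ (Nat.toDigitsCore 10 f x []).length + x := by
  induction f with
  | zero => omega
  | succ f ih =>
    intro x a hx
    simp only [Nat.toDigitsCore]
    have hdv : ((x % 10).digitChar.toNat - 48) = x % 10 := by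
      have : x % 10 < 10 := Nat.mod_lt _ (by norm_num)
      interval_cases h : x % 10 <;> decide
    by_cases h0 : x / 10 = 0
    · simp [h0, List.foldl, hdv]
      omega
    · simp only [h0]
      rw [pvCore_acc, if_neg (by simp)]
      have hx' : x / 10 < f := by omega
      rw [List.foldl_append, List.length_append, ih _ a hx']
      simp [List.foldl, hdv, pow_succ]
      ring_nf
      omega

lemma pvTd_ne (x : Nat) : Nat.toDigits 10 x ≠ [] := by
  show Nat.toDigitsCore 10 (x+1) x [] ≠ []
  simp only [Nat.toDigitsCore]
  by_cases h : x / 10 = 0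
  · simp [h]
  · rw [if_neg h, pvCore_acc]; simp

lemma pvTd_nocomma (x : Nat) : ',' ∉ Nat.toDigits 10 x := by
  intro h
  have := pvCore_digits (x+1) x ',' h
  revert this; decide

lemma pvTc_nocomma (x : Int) : ',' ∉ PySem.Int.toChars x := by
  unfold PySem.Int.toChars
  by_cases hx : x < 0
  · rw [if_pos hx]
    intro h
    rcases List.mem_cons.1 h with h | h
    · exact absurd h (by decide)
    · exact pvTd_nocomma _ h
  · rw [if_neg hx]
    exact pvTd_nocomma _

lemma pvKey_toList (i j : Int) :
    (pvKey i j).toList = PySem.Int.toChars i ++ ',' :: PySem.Int.toChars j := by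
  show ((PySem.Int.toStr i ++ "," ++ PySem.Int.toStr j)).toList = _
  rw [String.toList_append, String.toList_append, PySem.Int.toList_toStr, PySem.Int.toList_toStr]
  simp

lemma pvDecode_td (x : Nat) : pvDecode (Nat.toDigits 10 x) = x := by
  have := pvCore_decode (x+1) x 0 (by omega)
  unfold pvDecode Nat.toDigits
  rw [this]; ring

lemma pvDecInt_toChars (x : Int) : pvDecInt (PySem.Int.toChars x) = x := by
  unfold pvDecInt PySem.Int.toChars
  by_cases hx : x < 0
  · rw [if_pos hx, if_pos (by simp)]
    simp only [List.drop_succ_cons, List.drop_zero, pvDecode_td]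
    omega
  · rw [if_neg hx]
    cases h : Nat.toDigits 10 x.toNat with
    | nil => exact absurd h (pvTd_ne _)
    | cons c t =>
      have hmem : c ∈ Nat.toDigits 10 x.toNat := h ▸ List.mem_cons_self
      have hc : '0' ≤ c ∧ c ≤ '9' := by
        rw [Nat.toDigits] at hmem
        exact pvCore_digits (x.toNat + 1) x.toNat c hmem
      have hcne : c ≠ '-' := by
        intro hcc
        rw [hcc] at hc
        exact absurd hc (by decide)
      rw [← h, if_neg (by rw [h]; simp [hcne]), pvDecode_td]
      omega

lemma pvToChars_inj {x y : Int} (h : PySem.Int.toChars x = PySem.Int.toChars y) : x = y := by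
  have := congrArg pvDecInt h
  rwa [pvDecInt_toChars, pvDecInt_toChars] at this

lemma pvSplitComma {l1 : List Char} : ∀ {l1' l2 l2' : List Char}, ',' ∉ l1 → ',' ∉ l1' →
    l1 ++ ',' :: l2 = l1' ++ ',' :: l2' → l1 = l1' ∧ l2 = l2' := by
  induction l1 with
  | nil =>
    intro l1' l2 l2' _ h1' h
    cases l1' with
    | nil => simp_all
    | cons c t => simp at h; exact absurd h.1.symm (by simp_all)
  | cons c t ih =>
    intro l1' l2 l2' h1 h1' h
    cases l1' with
    | nil => simp at h; exact absurd h.1 (by simp_all)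
    | cons c' t' =>
      simp at h
      obtain ⟨rfl, h2⟩ := h
      have := ih (by simp_all) (by simp_all) h2
      simp_all

lemma pvKey_inj {i j i' j' : Int} (h : pvKey i j = pvKey i' j') : i = i' ∧ j = j' := by
  have h' := congrArg String.toList h
  rw [pvKey_toList, pvKey_toList] at h'
  have := pvSplitComma (pvTc_nocomma i) (pvTc_nocomma i') h'
  exact ⟨pvToChars_inj this.1, pvToChars_inj this.2⟩

lemma pvParse_key (i j : Int) : pvParse? (pvKey i j).toList = some (i, j) := by
  rw [pvKey_toList]
  unfold pvParse?
  have hno : ∀ c ∈ PySem.Int.toChars i, (fun c => decide (c ≠ ',')) c = true := by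
    intro c hc; simp; rintro rfl; exact pvTc_nocomma _ hc
  rw [List.dropWhile_append_of_pos hno, List.dropWhile_cons_of_neg (by simp),
      List.takeWhile_append_of_pos hno, List.takeWhile_cons_of_neg (by simp)]
  simp only [List.append_nil]
  rw [if_pos ⟨by rw [pvDecInt_toChars], by rw [pvDecInt_toChars]⟩,
    pvDecInt_toChars, pvDecInt_toChars]

lemma pvRelevant_key (m n i j : Int) :
    pvRelevant m n (pvKey i j).toList =
      (if m = 0 ∨ n = 0 ∨ (m = 1 ∧ n = 1) then i == m && j == n
       else decide (0 ≤ i) && decide (i ≤ m) && decide (0 ≤ j) && decide (j ≤ n) &&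
         !((i == 0 && decide (j ≤ 1)) || (i == 1 && j == 0))) := by
  unfold pvRelevant
  rw [pvParse_key]

-- cells A's recursion never revisits through the memo (their keys are never looked up below the top)
def pvEdge (i j : Int) : Prop := (i = 0 ∧ j ≤ 1) ∨ (i = 1 ∧ j = 0)

-- ---- the invariant carried by A's memo: every stored readable grid key holds the true path count ----
def pvInv (M N : Int) (d : PySem.Dict String Int) : Prop :=
  ∀ i j : Int, 0 ≤ i → i ≤ M → 0 ≤ j → j ≤ N → ¬ pvEdge i j →
    ∀ v, d.get? (pvKey i j) = some v → 1 ≤ i ∧ 1 ≤ j ∧ v = pvG i j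

lemma pvPascal {m n : Int} (hm : 1 ≤ m) (hn : 1 ≤ n) (hne : ¬(m = 1 ∧ n = 1)) :
    (if 1 ≤ m - 1 ∧ 1 ≤ n then pvG (m - 1) n else 0)
      + (if 1 ≤ m ∧ 1 ≤ n - 1 then pvG m (n - 1) else 0) = pvG m n := by
  by_cases hm1 : m = 1
  · subst hm1
    have hn2 : 2 ≤ n := by rcases hne with h; omega
    obtain ⟨b, rfl⟩ : ∃ b : Nat, n = (b : Int) + 2 := ⟨(n - 2).toNat, by omega⟩
    rw [if_neg (by omega), if_pos (by omega)]
    unfold pvG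
    have e1 : ((1:Int) - 1).toNat = 0 := by omega
    have e2 : ((b:Int) + 2 - 1 - 1).toNat = b := by omega
    have e3 : ((b:Int) + 2 - 1).toNat = b + 1 := by omega
    rw [e1, e2, e3]
    simp
  · by_cases hn1 : n = 1
    · subst hn1
      have hm2 : 2 ≤ m := by omega
      obtain ⟨a, rfl⟩ : ∃ a : Nat, m = (a : Int) + 2 := ⟨(m - 2).toNat, by omega⟩
      rw [if_pos (by omega), if_neg (by omega)]
      unfold pvG
      have e1 : ((1:Int) - 1).toNat = 0 := by omega
      have e2 : ((a:Int) + 2 - 1 - 1).toNat = a := by omega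
      have e3 : ((a:Int) + 2 - 1).toNat = a + 1 := by omega
      rw [e1, e2, e3]
      simp
    · obtain ⟨a, rfl⟩ : ∃ a : Nat, m = (a : Int) + 2 := ⟨(m - 2).toNat, by omega⟩
      obtain ⟨b, rfl⟩ : ∃ b : Nat, n = (b : Int) + 2 := ⟨(n - 2).toNat, by omega⟩
      rw [if_pos (by omega), if_pos (by omega)]
      unfold pvG
      have e1 : ((a:Int) + 2 - 1 - 1).toNat = a := by omega
      have e2 : ((a:Int) + 2 - 1).toNat = a + 1 := by omega
      have e3 : ((b:Int) + 2 - 1 - 1).toNat = b := by omega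
      have e4 : ((b:Int) + 2 - 1).toNat = b + 1 := by omega
      rw [e1, e2, e3, e4]
      have := Nat.choose_succ_succ (a + b + 1) a
      have harr : a + (b + 1) = a + b + 1 ∧ (a + 1) + b = a + b + 1 ∧ (a + 1) + (b + 1) = a + b + 1 + 1 := by omega
      rw [harr.1, harr.2.1, harr.2.2, this]
      push_cast
      ring

lemma pvGoA_correct : ∀ (fuel : Nat) (M N m n : Int) (d : PySem.Dict String Int),
    0 ≤ m → m ≤ M → 0 ≤ n → n ≤ N → ¬ pvEdge m n → (m + n).toNat < fuel → pvInv M N d →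
    (pvGoA fuel m n d).1 = (if 1 ≤ m ∧ 1 ≤ n then pvG m n else 0)
      ∧ pvInv M N (pvGoA fuel m n d).2 := by
  intro fuel
  induction fuel with
  | zero => intro M N m n d hm _ hn _ _ hf _; omega
  | succ fuel ih =>
    intro M N m n d hm hmM hn hnN hedge hf hInv
    simp only [pvGoA]
    cases hget : d.get? (pvKey m n) with
    | some v =>
      obtain ⟨h1, h2, rfl⟩ := hInv m n hm hmM hn hnN hedge v hget
      simp [h1, h2, hInv]
    | none =>
      by_cases h11 : m = 1 ∧ n = 1
      · obtain ⟨rfl, rfl⟩ := h11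
        simp [pvG, hInv]
      · rw [if_neg h11]
        by_cases h0 : m = 0 ∨ n = 0
        · rw [if_pos h0]
          constructor
          · rw [if_neg (by omega)]
          · exact hInv
        · rw [if_neg h0]
          have hm1 : 1 ≤ m := by omega
          have hn1 : 1 ≤ n := by omega
          have h11' : ¬(m = 1 ∧ n = 1) := h11
          have hrec1 := ih M N (m - 1) n d (by omega) (by omega) hn hnN
            (by unfold pvEdge; omega) (by omega) hInv
          have hrec2 := ih M N m (n - 1) (pvGoA fuel (m - 1) n d).2 hm hmM (by omega) (by omega)
            (by unfold pvEdge; omega) (by omega) hrec1.2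
          simp only []
          constructor
          · rw [PySem.Dict.getD_insert_self, hrec1.1, hrec2.1, pvPascal hm1 hn1 h11,
              if_pos ⟨hm1, hn1⟩]
          · intro i j hi hiM hj hjN hije v hv
            rw [PySem.Dict.get?_insert] at hv
            by_cases hk : pvKey i j = pvKey m n
            · rw [if_pos hk] at hv
              obtain ⟨rfl, rfl⟩ : i = m ∧ j = n := pvKey_inj hk
              refine ⟨hm1, hn1, ?_⟩
              rw [← Option.some_inj, ← hv, hrec1.1, hrec2.1, pvPascal hm1 hn1 h11]
            · rw [if_neg hk] at hv
              exact hrec2.2 i j hi hiM hj hjN hije v hv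

-- ---- B computes the same closed form ----
lemma pvLoop (B : Nat) : ∀ (K : Nat),
    (PySem.List.pyRange 1 ((K : Int) + 1) 1).foldl
        (fun r i => PySem.Int.floordiv (r * ((B : Int) + i)) i) 1
      = ((B + K).choose K : Nat) := by
  intro K
  induction K with
  | zero =>
    rw [show ((0 : Nat) : Int) + 1 = 1 by norm_num,
      show PySem.List.pyRange 1 1 = [] from by decide]
    simp
  | succ K ih =>
    have h1 : ((K + 1 : Nat) : Int) + 1 = ((K : Int) + 1) + 1 := by push_cast; ring
    rw [h1, PySem.List.pyRange_one_succ_right (by omega), List.foldl_append, ih]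
    simp only [List.foldl]
    have h2 : ((B + K).choose K : Int) * ((B : Int) + ((K : Int) + 1))
        = (((B + K).choose K * (B + K + 1) : Nat) : Int) := by push_cast; ring
    have h3 : ((K : Int) + 1) = ((K + 1 : Nat) : Int) := by push_cast; ring
    rw [h2, h3, PySem.Int.floordiv_natCast]
    congr 1
    have h4 : (B + K + 1) * (B + K).choose K = (B + K + 1).choose (K + 1) * (K + 1) :=
      Nat.add_one_mul_choose_eq (B + K) K
    have h5 : (B + K).choose K * (B + K + 1) = (B + K + 1).choose (K + 1) * (K + 1) := by
      rw [Nat.mul_comm]; exact h4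
    rw [h5, Nat.mul_div_cancel _ (by omega)]
    congr 1

lemma pvAlt_eq (m n : Int) (memo : List (String × Int)) :
    gridTraveler_memoization_alt m n memo = (if 1 ≤ m ∧ 1 ≤ n then pvG m n else 0) := by
  unfold gridTraveler_memoization_alt
  by_cases h : m ≤ 0 ∨ n ≤ 0
  · rw [if_pos h, if_neg (by omega)]
  · rw [if_neg h, if_pos (by omega)]
    show (PySem.List.pyRange 1 ((min m n - 1) + 1) 1).foldl
        (fun r i => PySem.Int.floordiv (r * (m + n - 2 - (min m n - 1) + i)) i) 1 = pvG m n
    obtain ⟨K, hK⟩ : ∃ K : Nat, min m n - 1 = (K : Int) :=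
      ⟨(min m n - 1).toNat, (Int.toNat_of_nonneg (by omega)).symm⟩
    obtain ⟨B, hB⟩ : ∃ B : Nat, m + n - 2 - (K : Int) = (B : Int) :=
      ⟨(m + n - 2 - (K : Int)).toNat, (Int.toNat_of_nonneg (by omega)).symm⟩
    rw [hK]
    simp only [hB]
    rw [pvLoop B K]
    unfold pvG
    rcases le_total m n with hmn | hmn
    · have e1 : K = (m - 1).toNat := by omega
      subst e1
      have e2 : B + (m - 1).toNat = (m - 1).toNat + (n - 1).toNat := by omega
      rw [e2]
    · have e3 : (m - 1).toNat ≤ B + K := by omega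
      have hsymm := Nat.choose_symm e3
      have e4 : B + K - (m - 1).toNat = K := by omega
      rw [e4] at hsymm
      rw [hsymm]
      have e2 : B + K = (m - 1).toNat + (n - 1).toNat := by omega
      rw [e2]

-- the initial memo: Dict lookup of a key that is in no list entry misses (duplicates allowed)
lemma pvGet?_mk_mem : ∀ (l : List (String × Int)) (k : String) (v : Int),
    (PySem.Dict.mk l).get? k = some v → ∃ p ∈ l, p.1 = k := by
  intro l
  induction l with
  | nil => intro k v h; simp [PySem.Dict.get?] at h
  | cons q t ih =>
    intro k v h
    rw [PySem.Dict.get?_mk_cons] at h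
    by_cases hq : q.1 == k
    · exact ⟨q, List.mem_cons_self, by simpa using hq⟩
    · rw [if_neg hq] at h
      obtain ⟨p, hp, hpk⟩ := ih k v h
      exact ⟨p, List.mem_cons_of_mem _ hp, hpk⟩

-- ===== VERDICT (by name: the statement is the Claim_ definition above) =====
theorem gridTraveler_memoization_spec : Claim_equal_gridTraveler_memoization := by
  intro m n memo _ hpre
  obtain ⟨hbound, hmemo⟩ := hpre
  show gridTraveler_memoization m n memo = gridTraveler_memoization_alt m n memo
  rw [pvAlt_eq]
  have hmiss : ∀ i j : Int, pvRelevant m n (pvKey i j).toList = true →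
      (PySem.Dict.mk memo).get? (pvKey i j) = (none : Option Int) := by
    intro i j hrel
    cases hget : (PySem.Dict.mk memo).get? (pvKey i j) with
    | none => rfl
    | some v =>
      obtain ⟨p, hp, hpk⟩ := pvGet?_mk_mem memo _ v hget
      rw [← hpk] at hrel
      rw [hmemo p hp] at hrel
      cases hrel
  by_cases hdeg : m = 0 ∨ n = 0 ∨ (m = 1 ∧ n = 1)
  · -- degenerate or 1×1 start: A reads only its own key, which Pre_ keeps out of the memo
    have htop : (PySem.Dict.mk memo).get? (pvKey m n) = (none : Option Int) := by
      apply hmiss m n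
      rw [pvRelevant_key m n m n, if_pos hdeg]
      simp
    rw [gridTraveler_memoization]
    simp only [pvGoA, htop]
    by_cases h11 : m = 1 ∧ n = 1
    · obtain ⟨rfl, rfl⟩ := h11
      simp [pvG]
    · have h0 : m = 0 ∨ n = 0 := by
        rcases hdeg with h | h | h
        · exact Or.inl h
        · exact Or.inr h
        · exact absurd h h11
      rw [if_neg h11, if_pos h0, if_neg (by omega)]
  · -- proper grid: the memo satisfies the invariant and the fuel recursion computes the count
    push_neg at hdeg
    have hm : 0 ≤ m ∧ 0 ≤ n := by
      rcases hbound with h | h | h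
      · exact absurd h hdeg.1
      · exact absurd h hdeg.2.1
      · exact h
    have hInv : pvInv m n (PySem.Dict.mk memo) := by
      intro i j hi him hj hjn hije v hv
      have hrel : pvRelevant m n (pvKey i j).toList = true := by
        rw [pvRelevant_key m n i j,
          if_neg (by
            rintro (h | h | h)
            · exact hdeg.1 h
            · exact hdeg.2.1 h
            · exact hdeg.2.2 h.1 h.2)]
        unfold pvEdge at hije
        simp only [Bool.and_eq_true, Bool.not_eq_true', Bool.or_eq_false_iff,
          Bool.and_eq_false_iff, decide_eq_true_eq]
        refine ⟨⟨⟨⟨hi, him⟩, hj⟩, hjn⟩, ?_, ?_⟩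
        · by_cases h : i = 0
          · right; simp; omega
          · left; simp [h]
        · by_cases h : i = 1
          · right; simp; omega
          · left; simp [h]
      rw [hmiss i j hrel] at hv
      cases hv
    have hedge : ¬ pvEdge m n := by unfold pvEdge; omega
    have := pvGoA_correct ((m + n).toNat + 1) m n m n (PySem.Dict.mk memo)
      hm.1 le_rfl hm.2 le_rfl hedge (by omega) hInv
    rw [gridTraveler_memoization, this.1]
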